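-- pv_equiv track=rewrite | github.com/pypi-data/pypi-mirror-28 | packages/networkutil/networkutil-1.11.3-py2.py3-none-any.whl/networkutil/validation.py | valid_ipv6
-- ===== SOURCE A (Python) =====
-- def valid_ipv6(ip):
--     """
--     3ffe:1900:4545:3:200:f8ff:fe21:67cf
--
--     Colons separate 16-bit fields. Leading zeros can be omitted in each field
--     as can be seen above where the field :0003: is written :3:. In addition,
--     a double colon (::) can be used once in an address to replace multiple
--     fields of zeros. For example:
--
--     fe80:0:0:0:200:f8ff:fe21:67cf can be written fe80::200:f8ff:fe21:67cf
--     """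
--     if len(ip) != len([c for c in ip if c in u'0123456789abcdefABCDEF:']):
--         return False
--     multiple_zeroes = len(ip.split(u'::')) - 1
--     if multiple_zeroes > 1:
--         return False  # Only one '::' allowed
--     parts = [part for part in ip.split(u':')]
--
--     if multiple_zeroes:
--         if len(parts) > 8:
--             return False
--
--     elif len(parts) != 8:
--         return False
--
--     if len([part for part in parts if len(part) < 5]) == len(parts):
--         return True
--
--     return False
-- ===== SOURCE B (Python) =====
-- def valid_ipv6(ip):
--     colons = 0          # number of ':' seen
--     run = 0             # length of current non-colon run
--     maxrun = 0          # longest non-colon run so far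
--     dc = 0              # greedy non-overlapping '::' count
--     pending = False     # previous char was a ':' not yet paired into a '::'
--     for c in ip:
--         if c == ':':
--             colons += 1
--             if run > maxrun:
--                 maxrun = run
--             run = 0
--             if pending:
--                 dc += 1
--                 pending = False
--             else:
--                 pending = True
--         elif c in u'0123456789abcdefABCDEF':
--             run += 1
--             pending = False
--         else:
--             return False
--     if run > maxrun:
--         maxrun = run
--     if dc > 1:
--         return False
--     parts = colons + 1
--     if dc:
--         if parts > 8:
--             return False
--     elif parts != 8:
--         return False
--     return maxrun <= 4
-- ===== Notes on version B (the rewrite author's own statement) =====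
-- stated objective: alternative
-- what changed: replaced A's multiple split/filter passes and intermediate lists with a single character scan maintaining a colon count, the maximal field run-length and a greedy non-overlapping '::' counter
import Mathlib
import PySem

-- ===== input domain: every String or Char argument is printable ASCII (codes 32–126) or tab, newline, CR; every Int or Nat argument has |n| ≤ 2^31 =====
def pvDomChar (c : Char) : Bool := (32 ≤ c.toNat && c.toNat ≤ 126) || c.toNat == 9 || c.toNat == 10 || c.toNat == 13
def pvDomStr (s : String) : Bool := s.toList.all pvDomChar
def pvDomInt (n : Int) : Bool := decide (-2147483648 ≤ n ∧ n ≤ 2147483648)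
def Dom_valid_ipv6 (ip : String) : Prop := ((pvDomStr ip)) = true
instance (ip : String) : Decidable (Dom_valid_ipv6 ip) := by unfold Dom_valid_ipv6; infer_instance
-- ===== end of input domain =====

-- B replaces A's repeated split/filter passes by one left-to-right character scan (alternative decomposition, same asymptotic cost).

-- ===== PORT A =====
-- 'c in u"0123456789abcdefABCDEF:"' is char membership in the literal character class (written out as its char list); split('::')/split(':') are
-- PySem.Chars.splitOn on the char list (exact: both separators are nonempty, so Python's split never raises).
def valid_ipv6 (ip : String) : Bool :=
  if PySem.Chars.len ip.toList ≠ (ip.toList.filter (fun c => (['0','1','2','3','4','5','6','7','8','9','a','b','c','d','e','f','A','B','C','D','E','F',':'] : List Char).contains c)).length then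
    false
  else
    let multiple_zeroes : Nat := (PySem.Chars.splitOn ip.toList [':', ':']).length - 1
    if multiple_zeroes > 1 then false
    else
      let parts := PySem.Chars.splitOn ip.toList [':']
      if multiple_zeroes ≠ 0 ∧ parts.length > 8 then false
      else if multiple_zeroes = 0 ∧ parts.length ≠ 8 then false
      else if (parts.filter (fun p => p.length < 5)).length = parts.length then true
      else false

-- ===== PORT B =====
def pvHexChar (c : Char) : Bool := (['0','1','2','3','4','5','6','7','8','9','a','b','c','d','e','f','A','B','C','D','E','F'] : List Char).contains c

-- B's loop; returns none on the early `return False` (invalid character), otherwise the final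
-- (colons, maxrun-after-the-trailing-update, dc) state.
def pvBLoop : List Char → Nat → Nat → Nat → Nat → Bool → Option (Nat × Nat × Nat)
  | [], colons, run, maxrun, dc, _ => some (colons, max maxrun run, dc)
  | c :: rest, colons, run, maxrun, dc, pending =>
    if c = ':' then
      if pending then pvBLoop rest (colons + 1) 0 (max maxrun run) (dc + 1) false
      else pvBLoop rest (colons + 1) 0 (max maxrun run) dc true
    else if pvHexChar c then pvBLoop rest colons (run + 1) maxrun dc false
    else none

def valid_ipv6_alt (ip : String) : Bool :=
  match pvBLoop ip.toList 0 0 0 0 false with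
  | none => false
  | some (colons, maxrun, dc) =>
    if dc > 1 then false
    else
      let parts := colons + 1
      if dc ≠ 0 then
        if parts > 8 then false else decide (maxrun ≤ 4)
      else if parts ≠ 8 then false
      else decide (maxrun ≤ 4)

-- ===== PRECONDITION & SPEC =====
def Spec_valid_ipv6 (ip : String) (out : Bool) : Prop := out = valid_ipv6_alt ip
instance (ip : String) (out : Bool) : Decidable (Spec_valid_ipv6 ip out) := by unfold Spec_valid_ipv6; infer_instance

-- ===== CLAIM (what is proved, stated in full; the proofs are below) =====
def Claim_equal_valid_ipv6 : Prop := ∀ (ip : String), Dom_valid_ipv6 ip → Spec_valid_ipv6 ip (valid_ipv6 ip)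

-- ===== LEMMAS AND PROOFS =====

-- splitOn.go equations and fuel-irrelevance
theorem pv_go_nil (sep : List Char) (fuel : Nat) (cur : List Char) (acc : List (List Char)) :
    PySem.Chars.splitOn.go sep fuel [] cur acc = (cur.reverse :: acc).reverse := by
  cases fuel
  · show ((cur.reverse ++ []) :: acc).reverse = _
    simp
  · rfl

theorem pv_go_cons (sep : List Char) (fuel : Nat) (c : Char) (rest cur : List Char) (acc : List (List Char)) :
    PySem.Chars.splitOn.go sep (fuel + 1) (c :: rest) cur acc =
      if sep.isPrefixOf (c :: rest) then
        PySem.Chars.splitOn.go sep fuel (List.drop sep.length (c :: rest)) [] (cur.reverse :: acc)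
      else PySem.Chars.splitOn.go sep fuel rest (c :: cur) acc := rfl

theorem pv_go_fuel (sep : List Char) (hsep : sep ≠ []) :
    ∀ (fuel fuel' : Nat) (s cur : List Char) (acc : List (List Char)),
      s.length ≤ fuel → s.length ≤ fuel' →
      PySem.Chars.splitOn.go sep fuel s cur acc = PySem.Chars.splitOn.go sep fuel' s cur acc := by
  intro fuel
  induction fuel with
  | zero =>
    intro fuel' s cur acc h h'
    have : s = [] := by cases s <;> simp_all
    subst this
    rw [pv_go_nil, pv_go_nil]
  | succ f ih =>
    intro fuel' s cur acc h h'
    cases s with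
    | nil => rw [pv_go_nil, pv_go_nil]
    | cons c rest =>
      cases fuel' with
      | zero => simp at h'
      | succ f' =>
        rw [pv_go_cons, pv_go_cons]
        by_cases hp : sep.isPrefixOf (c :: rest)
        · rw [if_pos hp, if_pos hp]
          have hlen : 1 ≤ sep.length := by cases sep <;> simp_all
          apply ih
          · simp at h ⊢; omega
          · simp at h' ⊢; omega
        · rw [if_neg hp, if_neg hp]
          apply ih
          · simp at h; omega
          · simp at h'; omega

theorem pv_modifyHead_modifyHead {α : Type} (f g : α → α) (l : List α) :
    (l.modifyHead g).modifyHead f = l.modifyHead (fun x => f (g x)) := by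
  cases l <;> simp

theorem pv_go_acc (sep : List Char) :
    ∀ (fuel : Nat) (s cur : List Char) (acc : List (List Char)),
      PySem.Chars.splitOn.go sep fuel s cur acc =
        acc.reverse ++ (PySem.Chars.splitOn.go sep fuel s [] []).modifyHead (cur.reverse ++ ·) := by
  intro fuel
  induction fuel with
  | zero =>
    intro s cur acc
    have h0 : ∀ (cur : List Char) (acc : List (List Char)),
        PySem.Chars.splitOn.go sep 0 s cur acc = ((cur.reverse ++ s) :: acc).reverse := fun _ _ => rfl
    rw [h0, h0]
    simp
  | succ f ih =>
    intro s cur acc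
    cases s with
    | nil => rw [pv_go_nil, pv_go_nil]; simp
    | cons c rest =>
      rw [pv_go_cons, pv_go_cons]
      by_cases hp : sep.isPrefixOf (c :: rest)
      · rw [if_pos hp, if_pos hp]
        rw [ih (List.drop sep.length (c :: rest)) [] (cur.reverse :: acc),
            ih (List.drop sep.length (c :: rest)) [] [[].reverse]]
        cases PySem.Chars.splitOn.go sep f (List.drop sep.length (c :: rest)) [] [] <;> simp
      · rw [if_neg hp, if_neg hp]
        rw [ih rest (c :: cur) acc, ih rest [c] []]
        cases PySem.Chars.splitOn.go sep f rest [] [] <;> simp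

theorem pv_splitOn_nil (sep : List Char) : PySem.Chars.splitOn [] sep = [[]] := by
  simp [PySem.Chars.splitOn, pv_go_nil]

theorem pv_splitOn_cons (sep : List Char) (hsep : sep ≠ []) (c : Char) (rest : List Char) :
    PySem.Chars.splitOn (c :: rest) sep =
      if sep.isPrefixOf (c :: rest) then
        [] :: PySem.Chars.splitOn (List.drop sep.length (c :: rest)) sep
      else (PySem.Chars.splitOn rest sep).modifyHead (c :: ·) := by
  have hlen : 1 ≤ sep.length := by cases sep <;> simp_all
  unfold PySem.Chars.splitOn
  rw [show (c :: rest).length + 1 = (rest.length + 1) + 1 from by simp]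
  rw [pv_go_cons]
  by_cases hp : sep.isPrefixOf (c :: rest)
  · rw [if_pos hp, if_pos hp]
    rw [pv_go_acc]
    rw [pv_go_fuel sep hsep (rest.length + 1) ((List.drop sep.length (c :: rest)).length + 1)
        (List.drop sep.length (c :: rest)) [] [] (by simp) (by omega)]
    show _ = [] :: PySem.Chars.splitOn.go sep _ _ [] []
    cases PySem.Chars.splitOn.go sep ((List.drop sep.length (c :: rest)).length + 1)
        (List.drop sep.length (c :: rest)) [] [] <;> simp
  · rw [if_neg hp, if_neg hp]
    rw [pv_go_acc]
    cases PySem.Chars.splitOn.go sep (rest.length + 1) rest [] [] <;> simp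

-- single-colon split equations
theorem pv_splitOn_one_colon (c : Char) (rest : List Char) :
    PySem.Chars.splitOn (c :: rest) [':'] =
      if c = ':' then [] :: PySem.Chars.splitOn rest [':']
      else (PySem.Chars.splitOn rest [':']).modifyHead (c :: ·) := by
  rw [pv_splitOn_cons [':'] (by simp) c rest]
  by_cases hc : c = ':'
  · subst hc; simp [List.isPrefixOf]
  · simp [List.isPrefixOf, hc, Ne.symm hc]

-- the parts' lengths of split(':')
def pvPartsLens (s : List Char) : List Nat := (PySem.Chars.splitOn s [':']).map List.length

theorem pv_partsLens_nil : pvPartsLens [] = [0] := by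
  simp [pvPartsLens, pv_splitOn_nil]

theorem pv_partsLens_colon (rest : List Char) : pvPartsLens (':' :: rest) = 0 :: pvPartsLens rest := by
  simp [pvPartsLens, pv_splitOn_one_colon]

theorem pv_partsLens_ne (c : Char) (hc : c ≠ ':') (rest : List Char) :
    pvPartsLens (c :: rest) = (pvPartsLens rest).modifyHead (· + 1) := by
  simp only [pvPartsLens, pv_splitOn_one_colon, hc, if_false]
  cases PySem.Chars.splitOn rest [':'] <;> simp

theorem pv_partsLens_length (s : List Char) : (pvPartsLens s).length = s.count ':' + 1 := by
  induction s with
  | nil => simp [pv_partsLens_nil]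
  | cons c rest ih =>
    by_cases hc : c = ':'
    · subst hc; simp [pv_partsLens_colon, ih]
    · rw [pv_partsLens_ne c hc]
      simp [hc, ih]

-- max of a list of naturals
def pvMaxOf (l : List Nat) : Nat := l.foldr max 0

theorem pv_maxOf_cons (x : Nat) (l : List Nat) : pvMaxOf (x :: l) = max x (pvMaxOf l) := rfl

theorem pv_maxOf_le_iff (l : List Nat) (n : Nat) : pvMaxOf l ≤ n ↔ ∀ x ∈ l, x ≤ n := by
  induction l with
  | nil => simp [pvMaxOf]
  | cons x t ih => simp [pv_maxOf_cons, ih]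

-- greedy non-overlapping '::' count, with a pending-colon flag
def pvGdc : Bool → List Char → Nat
  | _, [] => 0
  | pending, c :: rest =>
    if c = ':' then (if pending then 1 + pvGdc false rest else pvGdc true rest)
    else pvGdc false rest

theorem pv_gdc_true_not_colon (rest : List Char) (h : ∀ d r, rest = d :: r → d ≠ ':') :
    pvGdc true rest = pvGdc false rest := by
  cases rest with
  | nil => rfl
  | cons d r =>
    have hd := h d r rfl
    simp [pvGdc, hd]

theorem pv_splitOn_two_len : ∀ (n : Nat) (s : List Char), s.length ≤ n →
    (PySem.Chars.splitOn s [':', ':']).length = pvGdc false s + 1 := by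
  intro n
  induction n with
  | zero =>
    intro s h
    have : s = [] := by cases s <;> simp_all
    subst this; simp [pv_splitOn_nil, pvGdc]
  | succ m ih =>
    intro s h
    cases s with
    | nil => simp [pv_splitOn_nil, pvGdc]
    | cons c rest =>
      rw [pv_splitOn_cons [':', ':'] (by simp) c rest]
      by_cases hp : ([':', ':'] : List Char).isPrefixOf (c :: rest)
      · -- c = ':' and rest starts with ':'
        cases rest with
        | nil => simp [List.isPrefixOf] at hp
        | cons d r =>
          have hcd : ':' = c ∧ ':' = d := by
            simpa [List.isPrefixOf] using hp
          obtain ⟨hc, hd⟩ := hcd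
          subst hc; subst hd
          rw [if_pos hp]
          have hdrop : (List.drop ([':', ':'] : List Char).length (':' :: ':' :: r)) = r := by simp
          rw [hdrop]
          simp only [List.length_cons]
          rw [ih r (by simp at h; omega)]
          simp [pvGdc]
          omega
      · rw [if_neg hp]
        simp only [List.length_modifyHead]
        rw [ih rest (by simp at h; omega)]
        by_cases hc : c = ':'
        · subst hc
          have hrest : ∀ d r, rest = d :: r → d ≠ ':' := by
            intro d r hr hd
            subst hr; subst hd
            simp [List.isPrefixOf] at hp
          simp [pvGdc, pv_gdc_true_not_colon rest hrest]
        · simp [pvGdc, hc]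

-- characters: A's allowed set is B's hex set plus ':'
theorem pv_allowed_eq (c : Char) :
    ((['0','1','2','3','4','5','6','7','8','9','a','b','c','d','e','f','A','B','C','D','E','F',':'] : List Char).contains c) = (decide (c = ':') || pvHexChar c) := by
  have h : (['0','1','2','3','4','5','6','7','8','9','a','b','c','d','e','f','A','B','C','D','E','F',':'] : List Char) = ['0','1','2','3','4','5','6','7','8','9','a','b','c','d','e','f','A','B','C','D','E','F'] ++ [':'] := rfl
  have h2 : ([':'] : List Char).contains c = decide (c = ':') := by
    simp
  rw [h, List.contains_append, h2, Bool.or_comm]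
  rfl

-- B's loop on a string with an invalid character returns none
theorem pv_bLoop_none (s : List Char) (h : ∃ c ∈ s, ¬(c = ':' ∨ pvHexChar c = true)) :
    ∀ colons run maxrun dc pending, pvBLoop s colons run maxrun dc pending = none := by
  induction s with
  | nil => simp at h
  | cons c rest ih =>
    intro colons run maxrun dc pending
    by_cases hc : c = ':'
    · subst hc
      have h' : ∃ c ∈ rest, ¬(c = ':' ∨ pvHexChar c = true) := by
        rcases h with ⟨x, hx, hbad⟩
        rcases List.mem_cons.mp hx with hx | hx
        · exact absurd (Or.inl hx) hbad
        · exact ⟨x, hx, hbad⟩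
      cases pending with
      | false =>
        rw [show pvBLoop (':' :: rest) colons run maxrun dc false
              = pvBLoop rest (colons + 1) 0 (max maxrun run) dc true from rfl]
        exact ih h' _ _ _ _ _
      | true =>
        rw [show pvBLoop (':' :: rest) colons run maxrun dc true
              = pvBLoop rest (colons + 1) 0 (max maxrun run) (dc + 1) false from rfl]
        exact ih h' _ _ _ _ _
    · by_cases hhex : pvHexChar c = true
      · have h' : ∃ c ∈ rest, ¬(c = ':' ∨ pvHexChar c = true) := by
          rcases h with ⟨x, hx, hbad⟩
          rcases List.mem_cons.mp hx with hx | hx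
          · subst hx; exact absurd (Or.inr hhex) hbad
          · exact ⟨x, hx, hbad⟩
        simp [pvBLoop, hc, hhex, ih h']
      · simp [pvBLoop, hc, hhex]

-- B's loop invariant on a fully valid string
theorem pv_bLoop_spec (s : List Char) (h : ∀ c ∈ s, c = ':' ∨ pvHexChar c = true) :
    ∀ colons run maxrun dc pending,
      pvBLoop s colons run maxrun dc pending =
        some (colons + s.count ':',
              max maxrun (pvMaxOf ((pvPartsLens s).modifyHead (run + ·))),
              dc + pvGdc pending s) := by
  induction s with
  | nil =>
    intro colons run maxrun dc pending
    simp [pvBLoop, pv_partsLens_nil, pvMaxOf, pvGdc]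
  | cons c rest ih =>
    intro colons run maxrun dc pending
    have hrest : ∀ c ∈ rest, c = ':' ∨ pvHexChar c = true := fun x hx => h x (List.mem_cons_of_mem c hx)
    by_cases hc : c = ':'
    · subst hc
      have hmod0 : (pvPartsLens rest).modifyHead (fun x => x) = pvPartsLens rest := by
        cases pvPartsLens rest <;> simp
      cases pending with
      | false =>
        rw [show pvBLoop (':' :: rest) colons run maxrun dc false
              = pvBLoop rest (colons + 1) 0 (max maxrun run) dc true from rfl]
        rw [ih hrest, pv_partsLens_colon]
        simp [pv_maxOf_cons, hmod0, pvGdc]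
        all_goals omega
      | true =>
        rw [show pvBLoop (':' :: rest) colons run maxrun dc true
              = pvBLoop rest (colons + 1) 0 (max maxrun run) (dc + 1) false from rfl]
        rw [ih hrest, pv_partsLens_colon]
        simp [pv_maxOf_cons, hmod0, pvGdc]
        all_goals omega
    · have hhex : pvHexChar c = true := by
        rcases h c (List.mem_cons_self) with h1 | h1
        · exact absurd h1 hc
        · exact h1
      simp only [pvBLoop, hc, if_false, hhex, if_true]
      rw [ih hrest]
      rw [pv_partsLens_ne c hc, pv_modifyHead_modifyHead]
      have hfun : (fun x => run + (x + 1)) = (fun x => (run + 1) + x) := by funext x; omega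
      rw [hfun]
      simp [hc, pvGdc]

-- filter-length equality is 'all parts short'
theorem pv_filter_len_eq_iff (parts : List (List Char)) :
    ((parts.filter (fun p => p.length < 5)).length = parts.length) ↔ ∀ p ∈ parts, p.length < 5 := by
  rw [List.length_filter_eq_length_iff]
  simp

-- ===== VERDICT (by name: the statement is the Claim_ definition above) =====
theorem valid_ipv6_spec : Claim_equal_valid_ipv6 := by
  intro ip _
  unfold Spec_valid_ipv6
  unfold valid_ipv6 valid_ipv6_alt
  set s := ip.toList with hs
  by_cases hval : ∀ c ∈ s, c = ':' ∨ pvHexChar c = true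
  · -- every character allowed: A's first test passes, B's loop returns some
    have hfilter : s.filter (fun c => (['0','1','2','3','4','5','6','7','8','9','a','b','c','d','e','f','A','B','C','D','E','F',':'] : List Char).contains c) = s := by
      apply List.filter_eq_self.mpr
      intro c hc
      rw [pv_allowed_eq]
      rcases hval c hc with h1 | h1
      · simp [h1]
      · simp [h1]
    rw [hfilter]
    simp only [PySem.Chars.len_eq, ne_eq, not_true_eq_false, if_false]
    rw [pv_bLoop_spec s hval 0 0 0 0 false]
    have hmod0 : (pvPartsLens s).modifyHead ((0 : Nat) + ·) = pvPartsLens s := by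
      cases pvPartsLens s <;> simp
    rw [hmod0]
    simp only [Nat.zero_add, Nat.zero_max]
    have hmz : (PySem.Chars.splitOn s [':', ':']).length - 1 = pvGdc false s := by
      have := pv_splitOn_two_len s.length s le_rfl
      omega
    have hparts : (PySem.Chars.splitOn s [':']).length = s.count ':' + 1 := by
      have := pv_partsLens_length s
      simpa [pvPartsLens] using this
    have hfin : ((PySem.Chars.splitOn s [':']).filter (fun p => p.length < 5)).length
          = (PySem.Chars.splitOn s [':']).length ↔ pvMaxOf (pvPartsLens s) ≤ 4 := by
      rw [pv_filter_len_eq_iff, pv_maxOf_le_iff]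
      constructor
      · intro hall x hx
        simp only [pvPartsLens, List.mem_map] at hx
        rcases hx with ⟨p, hp, rfl⟩
        have := hall p hp
        omega
      · intro hall p hp
        have : p.length ∈ pvPartsLens s := by
          simp only [pvPartsLens, List.mem_map]
          exact ⟨p, hp, rfl⟩
        have := hall _ this
        omega
    have hlast : (if ((PySem.Chars.splitOn s [':']).filter (fun p => p.length < 5)).length
          = (PySem.Chars.splitOn s [':']).length then true else false)
        = decide (pvMaxOf (pvPartsLens s) ≤ 4) := by
      by_cases h4 : pvMaxOf (pvPartsLens s) ≤ 4
      · rw [if_pos (hfin.mpr h4)]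
        simp [h4]
      · rw [if_neg (fun hcon => h4 (hfin.mp hcon))]
        simp [h4]
    rw [hmz, hlast, hparts]
    by_cases h1 : pvGdc false s > 1
    · rw [if_pos h1, if_pos h1]
    · rw [if_neg h1, if_neg h1]
      by_cases h2 : pvGdc false s = 0
      · rw [if_neg (by simp [h2]), if_neg (by simp [h2] : ¬pvGdc false s ≠ 0)]
        by_cases h3 : s.count ':' + 1 = 8
        · rw [if_neg (by omega : ¬(pvGdc false s = 0 ∧ s.count ':' + 1 ≠ 8)),
              if_neg (by omega : ¬s.count ':' + 1 ≠ 8)]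
        · rw [if_pos (by omega : pvGdc false s = 0 ∧ s.count ':' + 1 ≠ 8),
              if_pos (by omega : s.count ':' + 1 ≠ 8)]
      · rw [if_pos (by omega : pvGdc false s ≠ 0)]
        by_cases h3 : s.count ':' + 1 > 8
        · rw [if_pos (by omega : pvGdc false s ≠ 0 ∧ s.count ':' + 1 > 8), if_pos h3]
        · rw [if_neg (by omega : ¬(pvGdc false s ≠ 0 ∧ s.count ':' + 1 > 8)),
              if_neg (by omega : ¬(pvGdc false s = 0 ∧ s.count ':' + 1 ≠ 8)), if_neg h3]
  · -- some invalid character: both sides are false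
    have hex : ∃ c ∈ s, ¬(c = ':' ∨ pvHexChar c = true) := by
      by_contra hcon
      apply hval
      intro c hc
      by_contra hbad
      exact hcon ⟨c, hc, hbad⟩
    rcases hex with ⟨c, hc, hbad⟩
    have hne : (s.filter (fun c => (['0','1','2','3','4','5','6','7','8','9','a','b','c','d','e','f','A','B','C','D','E','F',':'] : List Char).contains c)).length ≠ s.length := by
      intro heq
      have := List.length_filter_eq_length_iff.mp heq c hc
      rw [pv_allowed_eq] at this
      rcases Bool.or_eq_true_iff.mp this with h1 | h1
      · exact hbad (Or.inl (by simpa using h1))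
      · exact hbad (Or.inr h1)
    rw [pv_bLoop_none s ⟨c, hc, hbad⟩ 0 0 0 0 false]
    simp only [PySem.Chars.len_eq]
    split_ifs with hcnd <;>
      first
        | rfl
        | (exfalso; rw [not_ne_iff] at hcnd; exact hne (by exact_mod_cast hcnd.symm))
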